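-- pv_equiv track=rewrite | github.com/feltcat/courlan | courlan/urlutils.py | is_known_link
-- ===== SOURCE A (Python) =====
-- from typing import Any, List, Optional, Set, Tuple, Union
--
-- def is_known_link(link: str, known_links: Set[str]) -> bool:
--     "Compare the link and its possible variants to the existing URL base."
--     # check exact link
--     if link in known_links:
--         return True
--
--     # check link and variants with trailing slashes
--     test_links = [link.rstrip("/"), link.rstrip("/") + "/"]
--     if any(test_link in known_links for test_link in test_links):
--         return True
--
--     # check link and variants with modified protocol
--     if link.startswith("http"):
--         if link.startswith("https"):
--             testlink = link[:4] + link[5:]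
--         else:
--             testlink = "".join([link[:4], "s", link[4:]])
--         if any(
--             test in known_links
--             for test in [testlink, testlink.rstrip("/"), testlink.rstrip("/") + "/"]
--         ):
--             return True
--
--     return False
-- ===== SOURCE B (Python) =====
-- def is_known_link(link: str, known_links) -> bool:
--     "Compare the link and its possible variants to the existing URL base."
--     base = link.rstrip("/")
--     candidates = [link, base, base + "/"]
--     if link.startswith("http"):
--         if link.startswith("https"):
--             t = link[:4] + link[5:]
--         else:
--             t = link[:4] + "s" + link[4:]
--         tb = t.rstrip("/")
--         candidates += [t, tb, tb + "/"]
--     return any(k in candidates for k in known_links)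
-- ===== Notes on version B (the rewrite author's own statement) =====
-- stated objective: alternative
-- what changed: B builds the full candidate-variant list once (exact link, trailing-slash variants, protocol-swapped variants) and then makes a single pass over known_links testing membership in that list, instead of A's early-return cascade of per-candidate membership tests against known_links.
import Mathlib
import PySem

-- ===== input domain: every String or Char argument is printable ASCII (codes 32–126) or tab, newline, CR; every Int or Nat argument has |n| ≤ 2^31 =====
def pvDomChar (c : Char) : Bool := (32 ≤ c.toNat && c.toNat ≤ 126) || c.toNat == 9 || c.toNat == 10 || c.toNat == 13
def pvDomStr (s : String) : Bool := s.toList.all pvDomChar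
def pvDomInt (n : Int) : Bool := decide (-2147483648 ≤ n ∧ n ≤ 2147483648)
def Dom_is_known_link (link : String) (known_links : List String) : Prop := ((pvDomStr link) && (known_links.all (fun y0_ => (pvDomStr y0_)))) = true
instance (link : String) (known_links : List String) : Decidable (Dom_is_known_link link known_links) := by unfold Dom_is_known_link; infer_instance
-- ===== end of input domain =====

-- B restructures A's early-return cascade of membership tests into: build the candidate
-- list once, then one pass over known_links (objective: alternative decomposition).

-- s.rstrip("/") ported by hand (no PySem primitive for rstrip with a chars argument):
-- drop trailing '/' characters; exact for every string.
def pvRstripSlash (s : String) : String :=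
  String.ofList ((s.toList.reverse.dropWhile (· == '/')).reverse)

-- ===== PORT A =====
def is_known_link (link : String) (known_links : List String) : Bool :=
  -- check exact link
  if known_links.contains link then true
  else
    -- check link and variants with trailing slashes
    let test_links := [pvRstripSlash link, pvRstripSlash link ++ "/"]
    if test_links.any (fun t => known_links.contains t) then true
    else
      -- check link and variants with modified protocol
      if PySem.Str.startswith link "http" then
        let testlink :=
          if PySem.Str.startswith link "https" then
            PySem.Str.slice link none (some 4) ++ PySem.Str.slice link (some 5) none
          else
            PySem.Str.join "" [PySem.Str.slice link none (some 4), "s",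
                               PySem.Str.slice link (some 4) none]
        if [testlink, pvRstripSlash testlink, pvRstripSlash testlink ++ "/"].any
             (fun t => known_links.contains t) then true
        else false
      else false

-- ===== PORT B =====
def is_known_link_alt (link : String) (known_links : List String) : Bool :=
  let base := pvRstripSlash link
  let candidates :=
    if PySem.Str.startswith link "http" then
      let t :=
        if PySem.Str.startswith link "https" then
          PySem.Str.slice link none (some 4) ++ PySem.Str.slice link (some 5) none
        else
          PySem.Str.slice link none (some 4) ++ "s" ++ PySem.Str.slice link (some 4) none
      let tb := pvRstripSlash t
      [link, base, base ++ "/", t, tb, tb ++ "/"]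
    else [link, base, base ++ "/"]
  known_links.any (fun k => candidates.contains k)

-- ===== PRECONDITION & SPEC =====
def Spec_is_known_link (link : String) (known_links : List String) (out : Bool) : Prop := out = is_known_link_alt link known_links
instance (link : String) (known_links : List String) (out : Bool) : Decidable (Spec_is_known_link link known_links out) := by unfold Spec_is_known_link; infer_instance

-- ===== CLAIM (what is proved, stated in full; the proofs are below) =====
def Claim_equal_is_known_link : Prop := ∀ (link : String) (known_links : List String), Dom_is_known_link link known_links → Spec_is_known_link link known_links (is_known_link link known_links)

-- ===== LEMMAS AND PROOFS =====

-- swap the two membership directions: B scans known_links testing membership in the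
-- candidate list; that equals scanning the candidates testing membership in known_links
theorem pv_any_contains_comm (l m : List String) :
    (m.any (fun k => l.contains k)) = (l.any (fun c => m.contains c)) := by
  rw [Bool.eq_iff_iff]
  simp only [List.any_eq_true, List.contains_eq_mem, decide_eq_true_eq]
  tauto

-- "".join([a, "s", b]) is plain concatenation
theorem pv_join_empty_three (a b c : String) :
    PySem.Str.join "" [a, b, c] = a ++ b ++ c := by
  simp [PySem.Str.join, PySem.Chars.join, List.intercalate]
  rw [String.ext_iff]
  simp

theorem pv_main (link : String) (known_links : List String) :
    is_known_link link known_links = is_known_link_alt link known_links := by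
  unfold is_known_link is_known_link_alt
  rw [pv_any_contains_comm, pv_join_empty_three]
  by_cases h4 : PySem.Str.startswith link "http" = true
  · rw [if_pos h4, if_pos h4]
    by_cases h5 : PySem.Str.startswith link "https" = true
    · rw [if_pos h5]
      simp only [List.any_cons, List.any_nil, Bool.or_false]
      generalize known_links.contains link = a
      generalize known_links.contains (pvRstripSlash link) = b
      generalize known_links.contains (pvRstripSlash link ++ "/") = c
      generalize known_links.contains (PySem.Str.slice link none (some 4) ++ PySem.Str.slice link (some 5) none) = d
      generalize known_links.contains (pvRstripSlash (PySem.Str.slice link none (some 4) ++ PySem.Str.slice link (some 5) none)) = e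
      generalize known_links.contains (pvRstripSlash (PySem.Str.slice link none (some 4) ++ PySem.Str.slice link (some 5) none) ++ "/") = f
      revert a b c d e f; decide
    · rw [if_neg h5]
      simp only [List.any_cons, List.any_nil, Bool.or_false]
      generalize known_links.contains link = a
      generalize known_links.contains (pvRstripSlash link) = b
      generalize known_links.contains (pvRstripSlash link ++ "/") = c
      generalize known_links.contains (PySem.Str.slice link none (some 4) ++ "s" ++ PySem.Str.slice link (some 4) none) = d
      generalize known_links.contains (pvRstripSlash (PySem.Str.slice link none (some 4) ++ "s" ++ PySem.Str.slice link (some 4) none)) = e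
      generalize known_links.contains (pvRstripSlash (PySem.Str.slice link none (some 4) ++ "s" ++ PySem.Str.slice link (some 4) none) ++ "/") = f
      revert a b c d e f; decide
  · rw [if_neg h4, if_neg h4]
    simp only [List.any_cons, List.any_nil, Bool.or_false]
    generalize known_links.contains link = a
    generalize known_links.contains (pvRstripSlash link) = b
    generalize known_links.contains (pvRstripSlash link ++ "/") = c
    revert a b c; decide

-- ===== VERDICT (by name: the statement is the Claim_ definition above) =====
theorem is_known_link_spec : Claim_equal_is_known_link := by
  intro link known_links _
  exact pv_main link known_links
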